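-- pv_equiv track=rewrite | github.com/MHallweger/deepux2 | application/subtreeGenerator/save_subtree_info.py | get_subLeafNodes_ofC
-- ===== SOURCE A (Python) =====
-- def get_subLeafNodes_ofC(c, Dd, Dl):
--     Dd_ids = [d[0] for d in Dd]
--     Dl_ids = [l[0] for l in Dl]
--     leaf_ids_inDd = []
--     for d in Dd_ids:
--         for l in Dl_ids:
--             if d in l:
--                 if l not in leaf_ids_inDd:
--                     leaf_ids_inDd.append(l)
--     leaf_ids_offDd = [l for l in Dl_ids if l not in leaf_ids_inDd]
--     c_leaf = []
--     for l in leaf_ids_offDd: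
--         if c in l:
--             if l not in c_leaf:
--                 c_leaf.append(l)
--     return c_leaf
-- ===== SOURCE B (Python) =====
-- def get_subLeafNodes_ofC(c, Dd, Dl):
--     Dd_ids = [d[0] for d in Dd]
--     result = []
--     for x in Dl:
--         l = x[0]
--         if c in l and not any(d in l for d in Dd_ids) and l not in result:
--             result.append(l)
--     return result
-- ===== Notes on version B (the rewrite author's own statement) =====
-- stated objective: simpler
-- what changed: B replaces A's three phases (building a deduplicated exclusion table of leaf ids matching any Dd id, filtering against it, then a dedup pass for c) with one single pass over Dl that keeps a leaf id when it contains c, no Dd id is a substring of it, and it is not already in the result; this removes the list-membership scans over the exclusion table.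
import Mathlib
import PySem

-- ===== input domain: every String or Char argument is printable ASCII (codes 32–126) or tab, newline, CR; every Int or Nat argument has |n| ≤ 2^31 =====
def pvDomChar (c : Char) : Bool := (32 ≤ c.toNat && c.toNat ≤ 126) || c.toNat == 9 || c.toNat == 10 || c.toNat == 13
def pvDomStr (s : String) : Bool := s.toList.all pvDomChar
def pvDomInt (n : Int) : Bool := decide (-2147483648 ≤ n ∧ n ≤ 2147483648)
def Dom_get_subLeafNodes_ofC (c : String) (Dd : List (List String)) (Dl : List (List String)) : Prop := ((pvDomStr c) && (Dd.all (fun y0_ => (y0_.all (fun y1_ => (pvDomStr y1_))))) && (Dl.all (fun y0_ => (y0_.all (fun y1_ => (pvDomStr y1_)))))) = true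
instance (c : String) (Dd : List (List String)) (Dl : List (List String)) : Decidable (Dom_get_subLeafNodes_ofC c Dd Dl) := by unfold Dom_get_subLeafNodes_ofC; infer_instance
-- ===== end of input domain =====

-- B merges A's three phases (exclusion table, filter, dedup-collect) into one pass over Dl
-- with the Dd substring check done inline; same return value on every input where A returns.

-- ===== PORT A =====
-- d[0] / l[0]: under Pre_ every inner list is nonempty, so the getD default "" is never used
-- (Python raises IndexError exactly on the inputs Pre_ excludes).
def get_subLeafNodes_ofC (c : String) (Dd : List (List String)) (Dl : List (List String)) : List String :=
  let Dd_ids := Dd.map (fun d => PySem.List.pyGetD d 0 "")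
  let Dl_ids := Dl.map (fun l => PySem.List.pyGetD l 0 "")
  let leaf_ids_inDd := Dd_ids.foldl (fun acc d =>
      Dl_ids.foldl (fun acc2 l =>
        if PySem.Str.isIn d l then (if acc2.contains l then acc2 else acc2 ++ [l]) else acc2) acc) []
  let leaf_ids_offDd := Dl_ids.filter (fun l => !leaf_ids_inDd.contains l)
  leaf_ids_offDd.foldl (fun acc l =>
    if PySem.Str.isIn c l then (if acc.contains l then acc else acc ++ [l]) else acc) []

-- ===== PORT B =====
def get_subLeafNodes_ofC_alt (c : String) (Dd : List (List String)) (Dl : List (List String)) : List String :=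
  let Dd_ids := Dd.map (fun d => PySem.List.pyGetD d 0 "")
  Dl.foldl (fun res x =>
    let l := PySem.List.pyGetD x 0 ""
    if PySem.Str.isIn c l && !(Dd_ids.any (fun d => PySem.Str.isIn d l)) && !(res.contains l)
    then res ++ [l] else res) []

-- ===== PRECONDITION & SPEC =====
-- Pre_: every inner list of Dd and Dl is nonempty; on an empty one Python A raises IndexError at d[0]/l[0].
def Pre_get_subLeafNodes_ofC (c : String) (Dd : List (List String)) (Dl : List (List String)) : Prop :=
  (Dd.all (fun d => !d.isEmpty) && Dl.all (fun l => !l.isEmpty)) = true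
instance (c : String) (Dd : List (List String)) (Dl : List (List String)) : Decidable (Pre_get_subLeafNodes_ofC c Dd Dl) := by unfold Pre_get_subLeafNodes_ofC; infer_instance
def pvWitness_get_subLeafNodes_ofC : String × List (List String) × List (List String) :=
  ("a", [["b"]], [["ab"], ["ba"], ["ab"], ["cc"]])

def Spec_get_subLeafNodes_ofC (c : String) (Dd : List (List String)) (Dl : List (List String)) (out : List String) : Prop := out = get_subLeafNodes_ofC_alt c Dd Dl
instance (c : String) (Dd : List (List String)) (Dl : List (List String)) (out : List String) : Decidable (Spec_get_subLeafNodes_ofC c Dd Dl out) := by unfold Spec_get_subLeafNodes_ofC; infer_instance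

-- ===== CLAIM (what is proved, stated in full; the proofs are below) =====
def Claim_equal_get_subLeafNodes_ofC : Prop := ∀ (c : String) (Dd : List (List String)) (Dl : List (List String)), Dom_get_subLeafNodes_ofC c Dd Dl → Pre_get_subLeafNodes_ofC c Dd Dl → Spec_get_subLeafNodes_ofC c Dd Dl (get_subLeafNodes_ofC c Dd Dl)

-- ===== LEMMAS AND PROOFS =====

-- membership in 'append l unless already present'
theorem mem_addIf (acc : List String) (l x : String) :
    (x ∈ if acc.contains l = true then acc else acc ++ [l]) ↔ x ∈ acc ∨ x = l := by
  by_cases h : acc.contains l = true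
  · rw [if_pos h]
    constructor
    · exact Or.inl
    · rintro (hx | rfl)
      · exact hx
      · exact List.contains_iff_mem.mp h
  · rw [if_neg h]; simp

-- membership after A's inner collection fold over Dl_ids (one fixed d)
theorem mem_innerFold (d : String) (L : List String) (acc : List String) (x : String) :
    (x ∈ L.foldl (fun acc2 l =>
        if PySem.Str.isIn d l then (if acc2.contains l then acc2 else acc2 ++ [l]) else acc2) acc)
    ↔ x ∈ acc ∨ (x ∈ L ∧ PySem.Str.isIn d x = true) := by
  induction L generalizing acc with
  | nil => simp
  | cons l L ih =>
    rw [List.foldl_cons]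
    by_cases hin : PySem.Str.isIn d l = true
    · rw [if_pos hin, ih, mem_addIf]
      constructor
      · rintro ((h | rfl) | ⟨h1, h2⟩)
        · exact Or.inl h
        · exact Or.inr ⟨List.mem_cons_self, hin⟩
        · exact Or.inr ⟨List.mem_cons_of_mem _ h1, h2⟩
      · rintro (h | ⟨h1, h2⟩)
        · exact Or.inl (Or.inl h)
        · rcases List.mem_cons.mp h1 with rfl | h1
          · exact Or.inl (Or.inr rfl)
          · exact Or.inr ⟨h1, h2⟩
    · rw [if_neg hin, ih]
      constructor
      · rintro (h | ⟨h1, h2⟩)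
        · exact Or.inl h
        · exact Or.inr ⟨List.mem_cons_of_mem _ h1, h2⟩
      · rintro (h | ⟨h1, h2⟩)
        · exact Or.inl h
        · rcases List.mem_cons.mp h1 with rfl | h1
          · exact absurd h2 hin
          · exact Or.inr ⟨h1, h2⟩

-- membership in A's exclusion table: x is there iff x is a leaf id and some Dd id is a substring of it
theorem mem_inDd (Dd_ids Dl_ids : List String) (acc : List String) (x : String) :
    (x ∈ Dd_ids.foldl (fun acc d =>
        Dl_ids.foldl (fun acc2 l =>
          if PySem.Str.isIn d l then (if acc2.contains l then acc2 else acc2 ++ [l]) else acc2) acc) acc)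
    ↔ x ∈ acc ∨ (x ∈ Dl_ids ∧ ∃ d ∈ Dd_ids, PySem.Str.isIn d x = true) := by
  induction Dd_ids generalizing acc with
  | nil => simp
  | cons d Dd ih =>
    rw [List.foldl_cons, ih, mem_innerFold]
    constructor
    · rintro ((h | ⟨h1, h2⟩) | ⟨h1, d', hd', h2⟩)
      · exact Or.inl h
      · exact Or.inr ⟨h1, d, List.mem_cons_self, h2⟩
      · exact Or.inr ⟨h1, d', List.mem_cons_of_mem _ hd', h2⟩
    · rintro (h | ⟨h1, d', hd', h2⟩)
      · exact Or.inl (Or.inl h)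
      · rcases List.mem_cons.mp hd' with rfl | hd'
        · exact Or.inl (Or.inr ⟨h1, h2⟩)
        · exact Or.inr ⟨h1, d', hd', h2⟩

-- A's filtered dedup-collect pass equals B's single pass, given the per-element test agrees on L's members
theorem filter_fold_eq_fold (c : String) (q p : String → Bool)
    (L : List String) (acc : List String)
    (hq : ∀ l ∈ L, q l = p l) :
    (L.filter q).foldl (fun acc l =>
        if PySem.Str.isIn c l then (if acc.contains l then acc else acc ++ [l]) else acc) acc
    = L.foldl (fun res l =>
        if PySem.Str.isIn c l && p l && !(res.contains l) then res ++ [l] else res) acc := by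
  induction L generalizing acc with
  | nil => rfl
  | cons l L ih =>
    have hql : q l = p l := hq l List.mem_cons_self
    have hq' : ∀ x ∈ L, q x = p x := fun x hx => hq x (List.mem_cons_of_mem _ hx)
    rw [List.filter_cons]
    by_cases hp : p l = true
    · rw [if_pos (by rw [hql, hp]), List.foldl_cons, List.foldl_cons, ih _ hq']
      congr 1
      show (if PySem.Str.isIn c l = true then (if acc.contains l = true then acc else acc ++ [l]) else acc)
         = (if (PySem.Str.isIn c l && p l && !(acc.contains l)) = true then acc ++ [l] else acc)
      by_cases hc : PySem.Chars.isIn c.toList l.toList = true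
      · by_cases hm : l ∈ acc
        · simp [hc, hm]
        · simp [hc, hm, hp]
      · simp [hc]
    · have hpf : p l = false := by simpa using hp
      rw [if_neg (by rw [hql, hpf]; simp), List.foldl_cons, ih _ hq']
      congr 1
      show acc = (if (PySem.Str.isIn c l && p l && !(acc.contains l)) = true then acc ++ [l] else acc)
      simp [hpf]

-- the two ports are equal on all inputs (the precondition only marks where the Pythons raise)
theorem ports_eq (c : String) (Dd : List (List String)) (Dl : List (List String)) :
    get_subLeafNodes_ofC c Dd Dl = get_subLeafNodes_ofC_alt c Dd Dl := by
  show ((Dl.map (fun l => PySem.List.pyGetD l 0 "")).filter (fun l =>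
      !((Dd.map (fun d => PySem.List.pyGetD d 0 "")).foldl (fun acc d =>
        (Dl.map (fun l => PySem.List.pyGetD l 0 "")).foldl (fun acc2 x =>
          if PySem.Str.isIn d x then (if acc2.contains x then acc2 else acc2 ++ [x]) else acc2) acc) []).contains l)).foldl
      (fun acc l => if PySem.Str.isIn c l then (if acc.contains l then acc else acc ++ [l]) else acc) []
    = Dl.foldl (fun res x =>
        if PySem.Str.isIn c (PySem.List.pyGetD x 0 "") && !((Dd.map (fun d => PySem.List.pyGetD d 0 "")).any (fun d => PySem.Str.isIn d (PySem.List.pyGetD x 0 ""))) && !(res.contains (PySem.List.pyGetD x 0 ""))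
        then res ++ [PySem.List.pyGetD x 0 ""] else res) []
  refine Eq.trans (filter_fold_eq_fold c
      (fun l => !((Dd.map (fun d => PySem.List.pyGetD d 0 "")).foldl (fun acc d =>
        (Dl.map (fun l => PySem.List.pyGetD l 0 "")).foldl (fun acc2 x =>
          if PySem.Str.isIn d x then (if acc2.contains x then acc2 else acc2 ++ [x]) else acc2) acc) []).contains l)
      (fun l => !((Dd.map (fun d => PySem.List.pyGetD d 0 "")).any (fun d => PySem.Str.isIn d l)))
      (Dl.map (fun l => PySem.List.pyGetD l 0 "")) [] ?_)
    List.foldl_map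
  intro l hl
  show (!((Dd.map (fun d => PySem.List.pyGetD d 0 "")).foldl (fun acc d =>
      (Dl.map (fun l => PySem.List.pyGetD l 0 "")).foldl (fun acc2 x =>
        if PySem.Str.isIn d x then (if acc2.contains x then acc2 else acc2 ++ [x]) else acc2) acc) []).contains l)
    = (!((Dd.map (fun d => PySem.List.pyGetD d 0 "")).any (fun d => PySem.Str.isIn d l)))
  have hmem : (l ∈ (Dd.map (fun d => PySem.List.pyGetD d 0 "")).foldl (fun acc d =>
      (Dl.map (fun l => PySem.List.pyGetD l 0 "")).foldl (fun acc2 x =>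
        if PySem.Str.isIn d x then (if acc2.contains x then acc2 else acc2 ++ [x]) else acc2) acc) [])
      ↔ ∃ d ∈ Dd.map (fun d => PySem.List.pyGetD d 0 ""), PySem.Str.isIn d l = true := by
    rw [mem_inDd]
    simp [hl]
  have hc : ((Dd.map (fun d => PySem.List.pyGetD d 0 "")).foldl (fun acc d =>
      (Dl.map (fun l => PySem.List.pyGetD l 0 "")).foldl (fun acc2 x =>
        if PySem.Str.isIn d x then (if acc2.contains x then acc2 else acc2 ++ [x]) else acc2) acc) []).contains l
      = (Dd.map (fun d => PySem.List.pyGetD d 0 "")).any (fun d => PySem.Str.isIn d l) := by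
    rw [Bool.eq_iff_iff, List.contains_iff_mem, List.any_eq_true]
    exact hmem
  rw [hc]

-- ===== VERDICT (by name: the statement is the Claim_ definition above) =====
theorem get_subLeafNodes_ofC_spec : Claim_equal_get_subLeafNodes_ofC := by
  intro c Dd Dl _ _
  unfold Spec_get_subLeafNodes_ofC
  exact ports_eq c Dd Dl
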